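/- CARRIED OVER by tools/port_base_units.py (renaming only) from proofs.vorbis/Vorbis/Spec/Units, GENERATED there by farm/mkstatement.py from design/units.tsv (unit `qsort`) and the Specs of Vorbis/Spec/*.lean — do not edit.
   THE STATEMENT of the proof unit `qsort`: the function `qsort` (47 instructions) satisfies its contract,
   given the contracts of its callees. What the names mean: Vorbis/Spec/Basic.lean. The theorem to prove:
   `theorem qsort_ok : ProgX.Base.Spec.qsort.Statement`. -/
import ProgX.Base.Spec.LibcSort
namespace ProgX.Base.Spec.qsort
open X86 X86.User Asan

/-- The statement of unit `qsort`. -/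
def Statement : Prop :=
  ∀ (Lay : Layout) (_hLay : Lay.hi = 0x1000000) (μ : Microarch) (_hμ : UserX.MicroOK μ) (u₀ : State)
    (_hcode : HasCodeNat Lay u₀ ProgX.Base.L.qsort.entry ProgX.Base.Code.code_qsort.nat ProgX.Base.L.qsort.size)
    (_h_sift_down : ∀ (others : List Obj) (frames : List (Nat × FrameLayout)) (cmp : Word) (w : Nat), ProgX.Base.Spec.CmpSpec Lay μ u₀ others frames cmp w → Calls Lay μ ProgX.Base.WayInv (ProgX.Base.conv u₀) ProgX.Base.L.sift_down.entry (ProgX.Base.Spec.sift_down.spec others frames cmp w))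
    (_h_swap_bytes : ∀ (others : List Obj) (frames : List (Nat × FrameLayout)), Calls Lay μ ProgX.Base.WayInv (ProgX.Base.conv u₀) ProgX.Base.L.swap_bytes.entry (ProgX.Base.Spec.swap_bytes.spec others frames)),
    ∀ (others : List Obj) (frames : List (Nat × FrameLayout)) (cmp : Word) (w : Nat), ProgX.Base.Spec.CmpSpec Lay μ u₀ others frames cmp w → Calls Lay μ ProgX.Base.WayInv (ProgX.Base.conv u₀) ProgX.Base.L.qsort.entry (ProgX.Base.Spec.qsort.spec others frames cmp w)

end ProgX.Base.Spec.qsort
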